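-- pv_equiv track=rewrite | github.com/veektortee/scheduling-webapp | testcase_gui.py | _find_candidate_columns
-- ===== SOURCE A (Python) =====
-- def _find_candidate_columns(header_lower):
--     def find_col(names):
--         for i, h in enumerate(header_lower):
--             if h in names:
--                 return i
--         return None
--     c_shift = find_col({"shiftid", "shift id", "id", "shift"})
--     c_prov  = find_col({"assignee", "provider", "provider_name", "name"})
--     return c_shift, c_prov
-- ===== SOURCE B (Python) =====
-- def _find_candidate_columns(header_lower):
--     # Build a header->first-index table once, then query it per name set.
--     pos = {}
--     for i, h in enumerate(header_lower):
--         pos.setdefault(h, i)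
--     def col(names):
--         return min((pos[n] for n in names if n in pos), default=None)
--     return (col(("shiftid", "shift id", "id", "shift")),
--             col(("assignee", "provider", "provider_name", "name")))
-- ===== Notes on version B (the rewrite author's own statement) =====
-- stated objective: idiomatic
-- what changed: Instead of scanning the header once per name set, B builds a single header-to-first-index dict in one pass and computes each column as the minimum first-occurrence index among the matching names.
import Mathlib
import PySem

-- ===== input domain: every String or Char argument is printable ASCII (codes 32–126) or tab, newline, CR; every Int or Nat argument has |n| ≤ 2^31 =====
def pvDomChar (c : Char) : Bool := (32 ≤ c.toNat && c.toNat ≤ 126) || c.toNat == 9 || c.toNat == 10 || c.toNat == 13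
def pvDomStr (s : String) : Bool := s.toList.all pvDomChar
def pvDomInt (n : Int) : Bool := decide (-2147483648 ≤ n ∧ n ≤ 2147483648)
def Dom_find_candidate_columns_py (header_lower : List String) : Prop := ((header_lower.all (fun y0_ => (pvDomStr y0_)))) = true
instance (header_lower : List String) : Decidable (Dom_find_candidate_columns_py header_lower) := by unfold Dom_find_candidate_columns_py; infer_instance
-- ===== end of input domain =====

-- B builds one header->first-index dict in a single pass and takes the min matching index per name set (A rescans the header per set); idiomatic restructure, same results.


-- ===== PORT A =====
-- 'for i, h in enumerate(header_lower): if h in names: return i / return None'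
def findColA (names : List String) : Int → List String → Option Int
  | _, [] => none
  | i, h :: t => if h ∈ names then some i else findColA names (i + 1) t

def find_candidate_columns_py (header_lower : List String) : Option Int × Option Int :=
  let c_shift := findColA ["shiftid", "shift id", "id", "shift"] 0 header_lower
  let c_prov := findColA ["assignee", "provider", "provider_name", "name"] 0 header_lower
  (c_shift, c_prov)

-- ===== PORT B =====
-- 'for i, h in enumerate(header_lower): pos.setdefault(h, i)'
def posFoldB : PySem.Dict String Int → Int → List String → PySem.Dict String Int
  | d, _, [] => d
  | d, i, h :: t => posFoldB (d.setdefault h i) (i + 1) t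

-- 'min((pos[n] for n in names if n in pos), default=None)'
def colB (pos : PySem.Dict String Int) (names : List String) : Option Int :=
  (names.filterMap (fun n => pos.get? n)).min?

def find_candidate_columns_py_alt (header_lower : List String) : Option Int × Option Int :=
  let pos := posFoldB PySem.Dict.empty 0 header_lower
  (colB pos ["shiftid", "shift id", "id", "shift"],
   colB pos ["assignee", "provider", "provider_name", "name"])

-- ===== PRECONDITION & SPEC =====
def Spec_find_candidate_columns_py (header_lower : List String) (out : Option Int × Option Int) : Prop := out = find_candidate_columns_py_alt header_lower
instance (header_lower : List String) (out : Option Int × Option Int) : Decidable (Spec_find_candidate_columns_py header_lower out) := by unfold Spec_find_candidate_columns_py; infer_instance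

-- ===== CLAIM (what is proved, stated in full; the proofs are below) =====
def Claim_equal_find_candidate_columns_py : Prop := ∀ (header_lower : List String), Dom_find_candidate_columns_py header_lower → Spec_find_candidate_columns_py header_lower (find_candidate_columns_py header_lower)

-- ===== LEMMAS AND PROOFS =====

-- first index (from offset i) at which n occurs in the header
def firstIdx (n : String) : Int → List String → Option Int
  | _, [] => none
  | i, h :: t => if h = n then some i else firstIdx n (i + 1) t

theorem firstIdx_le {n : String} {i v : Int} {l : List String}
    (h : firstIdx n i l = some v) : i ≤ v := by
  induction l generalizing i with
  | nil => simp [firstIdx] at h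
  | cons a t ih =>
    simp only [firstIdx] at h
    split at h
    · cases h; omega
    · have := ih h; omega

theorem get?_posFoldB (n : String) (d : PySem.Dict String Int) (i : Int) (l : List String) :
    (posFoldB d i l).get? n = ((d.get? n).orElse (fun _ => firstIdx n i l)) := by
  induction l generalizing d i with
  | nil => rcases hc : d.get? n <;> simp [posFoldB, firstIdx, Option.orElse, hc]
  | cons h t ih =>
    simp only [posFoldB, firstIdx, ih]
    by_cases hn : n = h
    · subst hn
      rcases hc : d.get? n with _ | v
      · have hnc : d.contains n = false := by
          rw [PySem.Dict.contains_eq_isSome_get?, hc]; rfl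
        rw [PySem.Dict.setdefault_of_not_contains _ _ hnc,
            PySem.Dict.get?_insert_self]
        simp [Option.orElse]
      · have hcc : d.contains n = true := by
          rw [PySem.Dict.contains_eq_isSome_get?, hc]; rfl
        rw [PySem.Dict.setdefault_of_contains _ _ hcc, hc]
        simp [Option.orElse]
    · rw [PySem.Dict.get?_setdefault_of_ne _ _ hn]
      have hn' : h ≠ n := fun e => hn e.symm
      cases d.get? n <;> simp [Option.orElse, hn']

theorem findColA_eq_min (names : List String) (i : Int) (l : List String) :
    findColA names i l = (names.filterMap (fun n => firstIdx n i l)).min? := by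
  induction l generalizing i with
  | nil => simp [findColA, firstIdx]
  | cons h t ih =>
    simp only [findColA, firstIdx]
    by_cases hm : h ∈ names
    · simp only [hm, if_true]
      symm
      rw [List.min?_eq_some_iff]
      constructor
      · rw [List.mem_filterMap]
        exact ⟨h, hm, by simp⟩
      · intro b hb
        rw [List.mem_filterMap] at hb
        rcases hb with ⟨n, _, hn⟩
        by_cases hnh : h = n
        · simp [hnh] at hn; omega
        · simp only [hnh, if_false] at hn
          have := firstIdx_le hn; omega
    · simp only [hm, if_false, ih]
      congr 1
      apply List.filterMap_congr
      intro n hn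
      have : h ≠ n := fun he => hm (he ▸ hn)
      simp [this]

theorem colB_eq_findColA (header : List String) (names : List String) :
    colB (posFoldB PySem.Dict.empty 0 header) names = findColA names 0 header := by
  rw [findColA_eq_min, colB]
  congr 1
  apply List.filterMap_congr
  intro n _
  rw [get?_posFoldB]
  simp [Option.orElse]

-- ===== VERDICT (by name: the statement is the Claim_ definition above) =====
theorem find_candidate_columns_py_spec : Claim_equal_find_candidate_columns_py := by
  intro header _
  unfold Spec_find_candidate_columns_py find_candidate_columns_py find_candidate_columns_py_alt
  simp only [colB_eq_findColA]
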